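-- pv_equiv track=rewrite | github.com/Vict0r-David/UNIPG | Proba_Arg/Old_files/Old_DATA/Old_test/Algo_noCycle.py | get_paths_back
-- ===== SOURCE A (Python) =====
-- def get_paths_back(node, ldico_att_in, dico_att, paths=None, current_path=None):
--     if paths is None:
--         paths = []
--     if current_path is None:
--         current_path = []
--
--     current_path.append(node)
--     if ldico_att_in[node] == []:
--         paths.append(current_path)
--     else:
--         children = []
--         for att in ldico_att_in[node]:
--             children.append(dico_att[att][0])
--         for child in children:
--             get_paths_back(child, ldico_att_in, dico_att, paths, list(current_path))
--     return paths
-- ===== SOURCE B (Python) =====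
-- def _paths_from(node, ldico_att_in, dico_att):
--     atts = ldico_att_in[node]
--     if atts == []:
--         return [[node]]
--     out = []
--     for att in atts:
--         for s in _paths_from(dico_att[att][0], ldico_att_in, dico_att):
--             out.append([node] + s)
--     return out
--
-- def get_paths_back(node, ldico_att_in, dico_att, paths=None, current_path=None):
--     base = list(current_path) if current_path is not None else []
--     if paths is None:
--         paths = []
--     paths.extend(base + s for s in _paths_from(node, ldico_att_in, dico_att))
--     return paths
-- ===== Notes on version B (the rewrite author's own statement) =====
-- stated objective: simpler
-- what changed: A threads a paths accumulator and a growing current_path copy through the recursion; B computes the pure list of node-to-leaf suffix paths with a side-effect-free recursive helper and then prefixes/extends once at the top level.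
-- outside the precondition, e.g. on get_paths_back('a', {'a': ['x']}, {}, None, None): A raises KeyError, B raises KeyError; on get_paths_back('a', {'a': ['x']}, {'x': ['a']}, None, None): A raises RecursionError, B raises RecursionError
import Mathlib
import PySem

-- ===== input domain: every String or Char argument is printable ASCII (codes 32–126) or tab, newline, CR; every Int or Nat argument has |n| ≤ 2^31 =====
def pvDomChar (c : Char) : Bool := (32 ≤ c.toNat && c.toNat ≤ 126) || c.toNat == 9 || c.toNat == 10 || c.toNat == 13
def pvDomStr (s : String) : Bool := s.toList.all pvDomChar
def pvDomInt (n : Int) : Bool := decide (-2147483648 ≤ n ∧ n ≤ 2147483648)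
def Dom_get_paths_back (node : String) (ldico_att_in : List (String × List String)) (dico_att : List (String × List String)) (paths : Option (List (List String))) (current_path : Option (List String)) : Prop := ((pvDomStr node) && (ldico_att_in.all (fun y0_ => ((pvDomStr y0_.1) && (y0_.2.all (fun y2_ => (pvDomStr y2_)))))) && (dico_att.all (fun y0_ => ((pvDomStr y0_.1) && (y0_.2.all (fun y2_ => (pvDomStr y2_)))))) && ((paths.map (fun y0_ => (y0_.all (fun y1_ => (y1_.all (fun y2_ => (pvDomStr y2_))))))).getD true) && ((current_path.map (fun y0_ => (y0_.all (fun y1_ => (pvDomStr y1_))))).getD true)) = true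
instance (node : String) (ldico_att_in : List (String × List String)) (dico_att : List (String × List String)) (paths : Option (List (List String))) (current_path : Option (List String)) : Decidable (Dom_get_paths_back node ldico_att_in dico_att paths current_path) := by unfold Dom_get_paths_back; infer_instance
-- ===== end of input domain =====

-- B replaces A's accumulator-and-current-path threading recursion by a pure suffix-enumeration
-- function plus one prefixing pass (objective: simpler). Equivalence is about the RETURN value:
-- A also mutates `current_path` in place (appends `node`), B does not; both extend `paths` in place.

-- dico_att[att][0] : first element of the value of att; none = KeyError / IndexError
def pvChild (dico_att : List (String × List String)) (att : String) : Option String :=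
  (dico_att.lookup att).bind List.head?

-- ===== PORT A =====
-- fuel makes A's unbounded graph recursion total; Pre_ keeps the differential inputs where it suffices
def goA (l d : List (String × List String)) : Nat → String → List String → List (List String) → Option (List (List String))
  | 0, _, _, _ => none
  | fuel+1, node, cur, acc =>
    let cur' := cur ++ [node]               -- current_path.append(node)
    match l.lookup node with                -- ldico_att_in[node]
    | none => none                          -- KeyError
    | some atts =>
      if atts = [] then some (acc ++ [cur'])        -- paths.append(current_path)
      else
        match atts.mapM (pvChild d) with            -- children-building loop
        | none => none
        | some children =>
          children.foldlM (fun a c => goA l d fuel c cur' a) acc   -- recursive loop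

def get_paths_back (node : String) (ldico_att_in : List (String × List String)) (dico_att : List (String × List String)) (paths : Option (List (List String))) (current_path : Option (List String)) : List (List String) :=
  (goA ldico_att_in dico_att (ldico_att_in.length + 1) node (current_path.getD []) (paths.getD [])).getD []

-- ===== PORT B =====
-- _paths_from: pure list of node→leaf paths starting at node
def pfB (l d : List (String × List String)) : Nat → String → Option (List (List String))
  | 0, _ => none
  | fuel+1, node =>
    match l.lookup node with
    | none => none
    | some atts =>
      if atts = [] then some [[node]]
      else
        atts.foldlM (fun out att =>
          match pvChild d att with
          | none => none
          | some c => (pfB l d fuel c).map (fun ss => out ++ ss.map (fun s => node :: s))) []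

def get_paths_back_alt (node : String) (ldico_att_in : List (String × List String)) (dico_att : List (String × List String)) (paths : Option (List (List String))) (current_path : Option (List String)) : List (List String) :=
  let base := current_path.getD []
  let res := paths.getD []
  match pfB ldico_att_in dico_att (ldico_att_in.length + 1) node with
  | none => []
  | some ss => res ++ ss.map (fun s => base ++ s)

-- ===== PRECONDITION & SPEC =====
-- closure helpers for Pre_: nodes reachable from a set, iterated enough times to stabilise
def pvStep (l d : List (String × List String)) (R : List String) : List String :=
  (R ++ R.flatMap (fun n => ((l.lookup n).getD []).filterMap (pvChild d))).dedup
def pvReach (l d : List (String × List String)) (start : List String) : List String :=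
  (pvStep l d)^[l.length + 1] start

-- Pre_: A raises (KeyError/IndexError) or recurses forever unless every node reachable from
-- `node` is a key of ldico_att_in whose attackers all have a non-empty dico_att entry, and the
-- reachable part of the graph is acyclic; exactly those inputs are admitted.
def Pre_get_paths_back (node : String) (ldico_att_in : List (String × List String)) (dico_att : List (String × List String)) (paths : Option (List (List String))) (current_path : Option (List String)) : Prop :=
  (∀ m ∈ pvReach ldico_att_in dico_att [node],
      (ldico_att_in.lookup m).isSome ∧
      ∀ att ∈ (ldico_att_in.lookup m).getD [], (pvChild dico_att att).isSome) ∧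
  (∀ m ∈ pvReach ldico_att_in dico_att [node],
      m ∉ pvReach ldico_att_in dico_att (((ldico_att_in.lookup m).getD []).filterMap (pvChild dico_att)))
instance (node : String) (ldico_att_in : List (String × List String)) (dico_att : List (String × List String)) (paths : Option (List (List String))) (current_path : Option (List String)) : Decidable (Pre_get_paths_back node ldico_att_in dico_att paths current_path) := by unfold Pre_get_paths_back; infer_instance

def pvWitness_get_paths_back : String × (List (String × List String)) × (List (String × List String)) × Option (List (List String)) × Option (List String) :=
  ("a", [("a", ["x"]), ("b", [])], [("x", ["b"])], none, none)

def Spec_get_paths_back (node : String) (ldico_att_in : List (String × List String)) (dico_att : List (String × List String)) (paths : Option (List (List String))) (current_path : Option (List String)) (out : List (List String)) : Prop := out = get_paths_back_alt node ldico_att_in dico_att paths current_path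
instance (node : String) (ldico_att_in : List (String × List String)) (dico_att : List (String × List String)) (paths : Option (List (List String))) (current_path : Option (List String)) (out : List (List String)) : Decidable (Spec_get_paths_back node ldico_att_in dico_att paths current_path out) := by unfold Spec_get_paths_back; infer_instance

-- ===== CLAIM (what is proved, stated in full; the proofs are below) =====
def Claim_equal_get_paths_back : Prop := ∀ (node : String) (ldico_att_in : List (String × List String)) (dico_att : List (String × List String)) (paths : Option (List (List String))) (current_path : Option (List String)), Dom_get_paths_back node ldico_att_in dico_att paths current_path → Pre_get_paths_back node ldico_att_in dico_att paths current_path → Spec_get_paths_back node ldico_att_in dico_att paths current_path (get_paths_back node ldico_att_in dico_att paths current_path)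

-- ===== LEMMAS AND PROOFS =====

theorem pvWitness_ok :
    Dom_get_paths_back (pvWitness_get_paths_back.1) (pvWitness_get_paths_back.2.1) (pvWitness_get_paths_back.2.2.1) (pvWitness_get_paths_back.2.2.2.1) (pvWitness_get_paths_back.2.2.2.2) ∧
    Pre_get_paths_back (pvWitness_get_paths_back.1) (pvWitness_get_paths_back.2.1) (pvWitness_get_paths_back.2.2.1) (pvWitness_get_paths_back.2.2.2.1) (pvWitness_get_paths_back.2.2.2.2) := by
  decide

-- proof-only name for the body of B's inner fold
def pvBstep (l d : List (String × List String)) (fuel : Nat) (node : String)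
    (out : List (List String)) (att : String) : Option (List (List String)) :=
  match pvChild d att with
  | none => none
  | some c => (pfB l d fuel c).map (fun ss => out ++ ss.map (fun s => node :: s))

theorem pfB_succ (l d : List (String × List String)) (fuel : Nat) (node : String) :
    pfB l d (fuel+1) node
    = match l.lookup node with
      | none => none
      | some atts =>
        if atts = [] then some [[node]]
        else atts.foldlM (pvBstep l d fuel node) [] := rfl

-- B's inner fold only appends to its accumulator, so the accumulator factors out
theorem pfB_fold_shift (l d : List (String × List String)) (fuel : Nat) (node : String) :
    ∀ (atts : List String) (out : List (List String)),
      atts.foldlM (pvBstep l d fuel node) out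
      = (atts.foldlM (pvBstep l d fuel node) []).map (fun r => out ++ r) := by
  intro atts
  induction atts with
  | nil => intro out; simp
  | cons att rest ih =>
    intro out
    simp only [List.foldlM_cons]
    cases hc : pvChild d att with
    | none => simp [pvBstep, hc]
    | some c =>
      cases hp : pfB l d fuel c with
      | none => simp [pvBstep, hc, hp]
      | some ss =>
        simp only [pvBstep, hc, hp, Option.map_some, Option.pure_def, Option.bind_eq_bind, Option.bind, List.nil_append]
        rw [ih (out ++ ss.map (fun s => node :: s)), ih (ss.map (fun s => node :: s))]
        cases rest.foldlM (pvBstep l d fuel node) [] <;> simp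

-- the heart: A's accumulator recursion at a node equals B's pure suffixes, prefixed
theorem goA_eq_pfB (l d : List (String × List String)) :
    ∀ (fuel : Nat) (node : String) (cur : List String) (acc : List (List String)),
      goA l d fuel node cur acc
      = (pfB l d fuel node).map (fun ss => acc ++ ss.map (fun s => cur ++ s)) := by
  intro fuel
  induction fuel with
  | zero => intro node cur acc; simp [goA, pfB]
  | succ fuel IH =>
    intro node cur acc
    rw [pfB_succ]
    simp only [goA]
    cases hl : l.lookup node with
    | none => simp
    | some atts =>
      simp only
      by_cases hA : atts = []
      · subst hA; simp
      · simp only [if_neg hA]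
        -- inner induction over the attackers list
        clear hl hA
        induction atts generalizing acc with
        | nil =>
          simp
        | cons att rest ihr =>
          cases hc : pvChild d att with
          | none =>
            simp only [List.mapM_cons, hc, List.foldlM_cons, pvBstep, Option.pure_def, Option.bind_eq_bind, Option.bind]
            cases rest.mapM (pvChild d) <;> simp
          | some c =>
            cases hp : pfB l d fuel c with
            | none =>
              have hg : ∀ a, goA l d fuel c (cur ++ [node]) a = none := by
                intro a; rw [IH, hp]; rfl
              simp only [List.mapM_cons, hc, List.foldlM_cons, pvBstep, hp,
                Option.map_none, Option.pure_def, Option.bind_eq_bind, Option.bind]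
              cases hr : rest.mapM (pvChild d) with
              | none => simp
              | some children => simp [hg]
            | some ss =>
              simp only [List.mapM_cons, hc, List.foldlM_cons, pvBstep, hp,
                Option.map_some, Option.pure_def, Option.bind_eq_bind, Option.bind, List.nil_append]
              rw [pfB_fold_shift]
              cases hr : rest.mapM (pvChild d) with
              | none =>
                have := ihr acc
                rw [hr] at this
                simp only [Option.pure_def, Option.bind_eq_bind, Option.bind] at this
                cases hf : rest.foldlM (pvBstep l d fuel node) [] with
                | none => simp
                | some r =>
                  rw [pfB_fold_shift, hf] at this
                  simp at this
              | some children =>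
                simp only [Option.pure_def, Option.bind_eq_bind, Option.bind]
                rw [List.foldlM_cons, IH, hp]
                simp only [Option.map_some, Option.pure_def, Option.bind_eq_bind, Option.bind]
                have := ihr (acc ++ ss.map (fun s => (cur ++ [node]) ++ s))
                rw [hr] at this
                simp only [Option.pure_def, Option.bind_eq_bind, Option.bind] at this
                rw [this, pfB_fold_shift]
                cases hf : rest.foldlM (pvBstep l d fuel node) [] with
                | none => simp
                | some r =>
                  simp [List.map_append, List.append_assoc, Function.comp]

-- ===== VERDICT (by name: the statement is the Claim_ definition above) =====
theorem get_paths_back_spec : Claim_equal_get_paths_back := by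
  intro node l d paths cur _ _
  unfold Spec_get_paths_back get_paths_back get_paths_back_alt
  rw [goA_eq_pfB]
  cases pfB l d (l.length + 1) node <;> rfl
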